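-- pv_equiv track=rewrite | github.com/muh-adli/Web_Scraping | scrape.py | parse_keyword
-- ===== SOURCE A (Python) =====
-- def parse_keyword(keyword):
--     # Initialize an empty string to store the result
--     result = ""
--
--     # Iterate through each character in the keyword
--     for i in range(len(keyword)):
--         char = keyword[i]
--         # If the character is a space and the next character is a number, replace it with '%'
--         if char == ' ':
--             # Check if the next character exists and if it's a number
--             if i < len(keyword) - 1 and keyword[i+1].isdigit():
--                 result += '%'
--             else:
--                 result += '%20'
--         else:
--             result += char
--     return result
-- ===== SOURCE B (Python) =====
-- def parse_keyword(keyword):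
--     # Tokenize on spaces, then glue the pieces back together: the separator put
--     # back before each piece is '%' when the piece starts with a digit, else '%20'.
--     head, *rest = keyword.split(' ')
--     return head + ''.join(('%' if p[:1].isdigit() else '%20') + p for p in rest)
-- ===== Notes on version B (the rewrite author's own statement) =====
-- stated objective: alternative
-- what changed: Replaces A's per-character index loop by a tokenize-then-join scheme: split the keyword on spaces once and rejoin the pieces, choosing '%' or '%20' as the separator from whether the following piece starts with a digit.
import Mathlib
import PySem

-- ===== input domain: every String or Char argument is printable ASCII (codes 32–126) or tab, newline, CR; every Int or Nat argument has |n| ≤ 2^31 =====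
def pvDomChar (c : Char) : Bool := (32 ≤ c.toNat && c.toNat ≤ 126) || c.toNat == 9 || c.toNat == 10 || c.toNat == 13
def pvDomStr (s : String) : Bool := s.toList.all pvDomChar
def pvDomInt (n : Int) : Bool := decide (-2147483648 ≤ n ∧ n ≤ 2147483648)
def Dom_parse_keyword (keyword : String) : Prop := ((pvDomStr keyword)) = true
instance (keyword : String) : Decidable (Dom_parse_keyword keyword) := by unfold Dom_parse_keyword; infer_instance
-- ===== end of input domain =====

-- B replaces A's per-character index loop by split-on-space + join with computed
-- separators (objective: alternative, same asymptotic cost).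

-- ===== PORT A =====
-- literal port of A: loop over range(len(keyword)), indexing keyword[i] and keyword[i+1],
-- appending to an accumulated string (here a List Char, turned into a String at the end)
def parse_keyword (keyword : String) : String :=
  let cs := keyword.toList
  let n : Int := PySem.Str.len keyword
  let result := (PySem.List.pyRange 0 n 1).foldl (fun result i =>
    let char := PySem.List.pyGetD cs i ' '
    if char = ' ' then
      if i < n - 1 ∧ PySem.Chars.isdigit (PySem.List.pyGetD cs (i + 1) ' ') = true then
        result ++ ['%']
      else
        result ++ ['%', '2', '0']
    else
      result ++ [char]) []
  String.mk result

-- ===== PORT B =====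
-- literal port of B: keyword.split(' ') (PySem.Chars.splitOn, the sep ≠ '' form of
-- str.split), then the head piece followed by ''.join of ('%' or '%20', chosen by
-- whether the piece's first character p[:1] is a digit) prefixed to each later piece
def parse_keyword_alt (keyword : String) : String :=
  match PySem.Chars.splitOn keyword.toList [' '] with
  | [] => ""   -- unreachable: str.split always returns a non-empty list
  | head :: rest =>
      String.mk (head ++ PySem.Chars.join [] (rest.map (fun p =>
        (if PySem.Chars.strIsdigit (PySem.List.slice p none (some 1)) then ['%']
         else ['%', '2', '0']) ++ p)))

-- ===== PRECONDITION & SPEC =====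
def Spec_parse_keyword (keyword : String) (out : String) : Prop := out = parse_keyword_alt keyword
instance (keyword : String) (out : String) : Decidable (Spec_parse_keyword keyword out) := by unfold Spec_parse_keyword; infer_instance

-- ===== CLAIM (what is proved, stated in full; the proofs are below) =====
def Claim_equal_parse_keyword : Prop := ∀ (keyword : String), Dom_parse_keyword keyword → Spec_parse_keyword keyword (parse_keyword keyword)

-- ===== LEMMAS AND PROOFS =====

-- per-character replacement (the decision A makes at each position)
def pkStep (c : Char) (rest : List Char) : List Char :=
  if c = ' ' then
    match rest with
    | d :: _ => if PySem.Chars.isdigit d then ['%'] else ['%', '2', '0']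
    | [] => ['%', '2', '0']
  else [c]

-- reference: structural recursion producing the encoded character list
def pkGo : List Char → List Char
  | [] => []
  | c :: rest => pkStep c rest ++ pkGo rest

-- prepend to the first piece (the step shape of splitting on a separator)
def consHead (x : List Char) : List (List Char) → List (List Char)
  | [] => [x]
  | p :: ps => (x ++ p) :: ps

-- reference: structural recursion splitting on spaces
def splitSp : List Char → List (List Char)
  | [] => [[]]
  | c :: t => if c = ' ' then [] :: splitSp t else consHead [c] (splitSp t)

lemma splitSp_ne_nil (cs : List Char) : splitSp cs ≠ [] := by
  cases cs with
  | nil => simp [splitSp]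
  | cons c t =>
    by_cases hc : c = ' '
    · simp [splitSp, hc]
    · simp only [splitSp, if_neg hc]
      cases h : splitSp t <;> simp [consHead]

lemma consHead_append (x y : List Char) (ps : List (List Char)) :
    consHead (x ++ y) ps = consHead x (consHead y ps) := by
  cases ps <;> simp [consHead]

lemma consHead_nil (ps : List (List Char)) (h : ps ≠ []) : consHead [] ps = ps := by
  cases ps with
  | nil => exact absurd rfl h
  | cons p r => simp [consHead]

-- the fuelled splitter of PySem on the single-space separator is splitSp
lemma go_space : ∀ (fuel : Nat) (l cur : List Char) (acc : List (List Char)),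
    l.length ≤ fuel →
    PySem.Chars.splitOn.go [' '] fuel l cur acc
      = acc.reverse ++ consHead cur.reverse (splitSp l) := by
  intro fuel
  induction fuel with
  | zero =>
    intro l cur acc h
    have hl : l = [] := List.eq_nil_of_length_eq_zero (Nat.le_zero.mp h)
    subst hl
    simp [PySem.Chars.splitOn.go, splitSp, consHead]
  | succ fuel ih =>
    intro l cur acc h
    cases l with
    | nil => simp [PySem.Chars.splitOn.go, splitSp, consHead]
    | cons c rest =>
      simp only [PySem.Chars.splitOn.go]
      by_cases hc : c = ' '
      · subst hc
        rw [if_pos (by simp [List.isPrefixOf])]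
        rw [ih _ _ _ (by simpa using Nat.le_of_succ_le_succ h)]
        simp only [List.length_cons, List.length_nil, List.drop_succ_cons, List.drop_zero,
          List.reverse_nil, List.reverse_cons]
        rw [consHead_nil _ (splitSp_ne_nil _)]
        simp [splitSp, consHead]
      · rw [if_neg (by simp [List.isPrefixOf]; exact fun hh => hc hh.symm)]
        rw [ih _ _ _ (by simpa using Nat.le_of_succ_le_succ h)]
        simp only [List.reverse_cons, splitSp, if_neg hc, consHead_append]

lemma splitOn_space (cs : List Char) :
    PySem.Chars.splitOn cs [' '] = splitSp cs := by
  unfold PySem.Chars.splitOn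
  rw [go_space (cs.length + 1) cs [] [] (Nat.le_succ _)]
  simp [consHead_nil _ (splitSp_ne_nil cs)]

-- ''.join is plain concatenation
lemma join_empty_flat : ∀ (l : List (List Char)), PySem.Chars.join [] l = l.flatten := by
  intro l
  induction l with
  | nil => simp [PySem.Chars.join_nil]
  | cons x r ih =>
    cases r with
    | nil => simp [PySem.Chars.join_singleton]
    | cons y s =>
      rw [PySem.Chars.join_cons_cons, ih]
      simp

-- B's separator choice for a piece equals A's look-at-the-next-character decision
lemma sep_head (t : List Char) :
    PySem.Chars.strIsdigit (PySem.List.slice ((splitSp t).headD []) none (some 1))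
      = (match t with | d :: _ => PySem.Chars.isdigit d | [] => false) := by
  cases t with
  | nil => simp [splitSp, PySem.List.slice, PySem.Chars.strIsdigit]
  | cons d t' =>
    by_cases hd : d = ' '
    · subst hd
      simp [splitSp, PySem.List.slice, PySem.Chars.strIsdigit]
      decide
    · simp only [splitSp, if_neg hd]
      cases h : splitSp t' with
      | nil => exact absurd h (splitSp_ne_nil t')
      | cons p ps =>
        simp only [consHead, List.headD_cons]
        rw [PySem.List.slice_to _ (by norm_num)]
        simp [PySem.Chars.strIsdigit]

-- B's split-then-join computation produces pkGo
lemma B_eq_pkGo : ∀ (cs : List Char),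
    (match splitSp cs with
     | [] => []
     | head :: rest =>
        head ++ (rest.map (fun p =>
          (if PySem.Chars.strIsdigit (PySem.List.slice p none (some 1)) then ['%']
           else ['%', '2', '0']) ++ p)).flatten)
      = pkGo cs := by
  intro cs
  induction cs with
  | nil => simp [splitSp, pkGo]
  | cons c t ih =>
    by_cases hc : c = ' '
    · subst hc
      rw [show splitSp (' ' :: t) = [] :: splitSp t from by simp [splitSp]]
      cases h : splitSp t with
      | nil => exact absurd h (splitSp_ne_nil t)
      | cons p ps =>
        rw [h] at ih
        have hsep := sep_head t
        rw [h] at hsep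
        simp only [List.headD_cons] at hsep
        simp only [List.map_cons, List.flatten_cons, List.nil_append]
        simp only at ih
        rw [hsep, List.append_assoc, ih]
        cases t with
        | nil => simp [pkGo, pkStep]
        | cons d t' => simp [pkGo, pkStep]
    · simp only [splitSp, if_neg hc]
      cases h : splitSp t with
      | nil => exact absurd h (splitSp_ne_nil t)
      | cons p ps =>
        rw [h] at ih
        simp only [consHead, List.singleton_append]
        simp only [pkGo, pkStep, if_neg hc]
        simpa using ih

lemma pk_foldA (cs : List Char) : ∀ (suf pre : List Char) (acc : List Char), cs = pre ++ suf →
    (PySem.List.pyRange (pre.length : Int) (cs.length : Int) 1).foldl (fun result i =>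
      if PySem.List.pyGetD cs i ' ' = ' ' then
        if i < (cs.length : Int) - 1 ∧ PySem.Chars.isdigit (PySem.List.pyGetD cs (i + 1) ' ') = true then
          result ++ ['%']
        else
          result ++ ['%', '2', '0']
      else
        result ++ [PySem.List.pyGetD cs i ' ']) acc
    = acc ++ pkGo suf := by
  intro suf
  induction suf with
  | nil =>
    intro pre acc h
    subst h
    rw [PySem.List.pyRange_one_eq_nil (by simp)]
    simp [pkGo]
  | cons d rest ih =>
    intro pre acc h
    subst h
    have hlt : (pre.length : Int) < ((pre ++ d :: rest).length : Int) := by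
      simp
    rw [PySem.List.pyRange_one_cons hlt, List.foldl_cons]
    have hget : PySem.List.pyGetD (pre ++ d :: rest) (pre.length : Int) ' ' = d := by
      simp [PySem.List.pyGetD]
    have hnext : PySem.List.pyGetD (pre ++ d :: rest) ((pre.length : Int) + 1) ' '
        = rest.headD ' ' := by
      rw [show pre ++ d :: rest = (pre ++ [d]) ++ rest by simp]
      simp only [PySem.List.pyGetD]
      rw [show ((pre.length : Int) + 1) = (((pre ++ [d]).length : Int) + ((0 : Nat) : Int)) by simp]
      rw [PySem.List.pyGet?_append_right]
      cases rest <;> simp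
    have hrec : ∀ acc' : List Char,
        (PySem.List.pyRange ((pre.length : Int) + 1) (((pre ++ d :: rest).length : Int)) 1).foldl
          (fun result i =>
            if PySem.List.pyGetD (pre ++ d :: rest) i ' ' = ' ' then
              if i < (((pre ++ d :: rest).length : Int)) - 1 ∧
                  PySem.Chars.isdigit (PySem.List.pyGetD (pre ++ d :: rest) (i + 1) ' ') = true then
                result ++ ['%']
              else
                result ++ ['%', '2', '0']
            else
              result ++ [PySem.List.pyGetD (pre ++ d :: rest) i ' ']) acc'
        = acc' ++ pkGo rest := by
      intro acc'
      have h2 := ih (pre ++ [d]) acc' (by simp)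
      rw [show (((pre ++ [d]).length : Int)) = (pre.length : Int) + 1 by simp] at h2
      exact h2
    simp only [hget, hnext]
    rw [hrec]
    by_cases hd : d = ' '
    · rw [if_pos hd]
      cases rest with
      | nil =>
        have hno : ¬ ((pre.length : Int) < (((pre ++ d :: ([] : List Char)).length : Int)) - 1 ∧
            PySem.Chars.isdigit (List.headD ([] : List Char) ' ') = true) := by
          rintro ⟨h1, -⟩
          simp at h1
        rw [if_neg hno]
        simp [pkGo, pkStep, hd]
      | cons e rs =>
        have hyes : (pre.length : Int) < (((pre ++ d :: e :: rs).length : Int)) - 1 := by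
          simp only [List.length_append, List.length_cons]
          push_cast
          omega
        by_cases he : PySem.Chars.isdigit ((e :: rs).headD ' ') = true
        · rw [if_pos ⟨hyes, he⟩]
          simp only [List.headD_cons] at he
          simp [pkGo, pkStep, hd, he]
        · rw [if_neg (by rintro ⟨-, h2⟩; exact he h2)]
          simp only [List.headD_cons] at he
          simp [pkGo, pkStep, hd, he]
    · rw [if_neg hd]
      simp [pkGo, pkStep, hd]

-- ===== VERDICT (by name: the statement is the Claim_ definition above) =====
theorem parse_keyword_spec : Claim_equal_parse_keyword := by
  intro keyword _
  unfold Spec_parse_keyword parse_keyword parse_keyword_alt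
  have hA := pk_foldA keyword.toList keyword.toList [] [] rfl
  simp only [List.length_nil, Nat.cast_zero] at hA
  simp only [PySem.Str.len_eq]
  rw [splitOn_space]
  have hB := B_eq_pkGo keyword.toList
  cases h : splitSp keyword.toList with
  | nil => exact absurd h (splitSp_ne_nil _)
  | cons p ps =>
    rw [h] at hB
    have hBB : p ++ PySem.Chars.join [] (ps.map (fun p =>
        (if PySem.Chars.strIsdigit (PySem.List.slice p none (some 1)) then ['%']
         else ['%', '2', '0']) ++ p)) = pkGo keyword.toList := by
      rw [join_empty_flat]
      exact hB
    exact (congrArg String.mk (hA.trans (List.nil_append _))).trans (congrArg String.mk hBB).symm
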